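-- pv_equiv track=rewrite | github.com/camargodev/advent-of-code-2023 | day-14/src/part_1/rolling_stones.py | move_like_jeager
-- ===== SOURCE A (Python) =====
-- CUBE_STONE = "#"
--
-- ROLLING_STONE = "O"
--
-- SPACE = "."
--
-- class GridTransposer:
--      @staticmethod
--      def transpose(grid):
--         def clear_grid(grid):
--              return [line.replace("\n", "") for line in grid]
--
--         grid = clear_grid(grid)
--         num_transposed_rows = len(grid[0])
--         transposed_grid = ["" for _ in range(num_transposed_rows)]
--         for line in grid:
--             for char_idx, char in enumerate(line):
--                 transposed_grid[char_idx] += char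
--         return transposed_grid
--
-- def move_like_jeager(lines):
--     max_possible_points = len(lines)
--     stones = GridTransposer.transpose(lines)
--
--     total = 0
--     for stone_line in stones:
--         line_total = 0
--         current_max_points = max_possible_points
--         for stone_idx, stone in enumerate(stone_line):
--             if stone == SPACE:
--                 continue
--             if stone == ROLLING_STONE:
--                 line_total += current_max_points
--             elif stone == CUBE_STONE:
--                 current_max_points = (max_possible_points - stone_idx)
--             current_max_points -= 1
--         total += line_total
--     return total
-- ===== SOURCE B (Python) =====
-- def move_like_jeager(lines):
--     # Row-major single pass with per-column landing pointers: no transposed grid is built.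
--     rows = [line.replace("\n", "") for line in lines]
--     num_rows = len(lines)
--     # per-column state: (next free landing slot, cells seen in this column, load so far)
--     cols = [(0, 0, 0) for _ in rows[0]]
--     for row in rows:
--         for c, ch in enumerate(row):
--             free, seen, load = cols[c]
--             if ch == "O":
--                 cols[c] = (free + 1, seen + 1, load + (num_rows - free))
--             elif ch == "#":
--                 cols[c] = (seen + 1, seen + 1, load)
--             elif ch == ".":
--                 cols[c] = (free, seen + 1, load)
--             else:
--                 # any other character occupies its slot without scoring
--                 cols[c] = (free + 1, seen + 1, load)
--     return sum(load for _, _, load in cols)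
-- ===== Notes on version B (the rewrite author's own statement) =====
-- stated objective: faster
-- what changed: B removes the transposed-grid construction entirely: one row-major pass over the rows maintains per-column (next-free landing slot, cells seen, load) state, instead of building column strings by repeated concatenation and re-scanning each with a resettable decrementing counter.
import Mathlib
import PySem

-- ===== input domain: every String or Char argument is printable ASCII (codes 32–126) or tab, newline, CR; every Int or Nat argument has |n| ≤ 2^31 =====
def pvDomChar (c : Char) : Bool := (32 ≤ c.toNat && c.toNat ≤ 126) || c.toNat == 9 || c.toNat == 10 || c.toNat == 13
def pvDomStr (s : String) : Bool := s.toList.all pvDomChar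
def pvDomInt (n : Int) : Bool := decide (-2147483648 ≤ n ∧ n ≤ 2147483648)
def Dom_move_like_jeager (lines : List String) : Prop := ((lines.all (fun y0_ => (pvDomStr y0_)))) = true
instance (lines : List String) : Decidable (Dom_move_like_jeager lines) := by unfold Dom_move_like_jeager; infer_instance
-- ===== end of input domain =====

-- B replaces A's transposed-grid-plus-decrementing-counter scan by a single row-major
-- pass with per-column (next-free slot, cells seen, load) state; no transpose is built,
-- avoiding A's repeated column-string concatenation (measured faster in a timing run).


-- ===== PORT A =====
-- clear_grid: line.replace("\n", "") (strings handled as their char lists)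
def pvStripA (l : String) : List Char := (PySem.Str.replace l "\n" "").toList

-- inner transpose loop: for char_idx, char in enumerate(line): transposed_grid[char_idx] += char
def pvTransposeRow (tg : List (List Char)) (line : List Char) : List (List Char) :=
  (PySem.List.enumerate line).foldl
    (fun tg ic => tg.set ic.1.toNat (tg.getD ic.1.toNat [] ++ [ic.2])) tg

def pvTransposeA (grid : List String) : List (List Char) :=
  let g := grid.map pvStripA
  let numTransposedRows := (g.headD []).length   -- len(grid[0]); IndexError on [] is excluded by Pre_
  let tg := List.replicate numTransposedRows ([] : List Char)
  g.foldl pvTransposeRow tg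

-- per-column loop: line_total / current_max_points over enumerate(stone_line)
def pvColA (n : Int) (col : List Char) : Int :=
  ((PySem.List.enumerate col).foldl
    (fun (st : Int × Int) ic =>
      if ic.2 = '.' then st
      else if ic.2 = 'O' then (st.1 + st.2, st.2 - 1)
      else if ic.2 = '#' then (st.1, (n - ic.1) - 1)
      else (st.1, st.2 - 1)) ((0 : Int), n)).1

def move_like_jeager (lines : List String) : Int :=
  let maxPossiblePoints : Int := lines.length
  let stones := pvTransposeA lines
  stones.foldl (fun total col => total + pvColA maxPossiblePoints col) 0

-- ===== PORT B =====
-- per-column state (free, seen, load): next free landing slot, cells seen, load so far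
def pvStepB (n : Int) (st : Int × Int × Int) (ch : Char) : Int × Int × Int :=
  if ch = 'O' then (st.1 + 1, st.2.1 + 1, st.2.2 + (n - st.1))
  else if ch = '#' then (st.2.1 + 1, st.2.1 + 1, st.2.2)
  else if ch = '.' then (st.1, st.2.1 + 1, st.2.2)
  else (st.1 + 1, st.2.1 + 1, st.2.2)   -- any other character occupies its slot without scoring

-- inner row loop: for c, ch in enumerate(row): cols[c] = step(cols[c], ch)
def pvRowB (n : Int) (cols : List (Int × Int × Int)) (row : List Char) : List (Int × Int × Int) :=
  (PySem.List.enumerate row).foldl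
    (fun cols ic => cols.set ic.1.toNat (pvStepB n (cols.getD ic.1.toNat (0, 0, 0)) ic.2)) cols

def move_like_jeager_alt (lines : List String) : Int :=
  let rows := lines.map (fun l => (PySem.Str.replace l "\n" "").toList)
  let numRows : Int := lines.length
  let cols := List.replicate (rows.headD []).length ((0, 0, 0) : Int × Int × Int)
  let final := rows.foldl (pvRowB numRows) cols
  (final.map (fun t => t.2.2)).sum

-- ===== PRECONDITION & SPEC =====
-- Pre_ excludes exactly the inputs where A raises IndexError: the empty list (grid[0]) and
-- grids in which some newline-stripped line is longer than the first one (transposed_grid[c]).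
def Pre_move_like_jeager (lines : List String) : Prop :=
  lines ≠ [] ∧ ∀ l ∈ lines,
    (PySem.Str.replace l "\n" "").toList.length
      ≤ (PySem.Str.replace (lines.headD "") "\n" "").toList.length
instance (lines : List String) : Decidable (Pre_move_like_jeager lines) := by
  unfold Pre_move_like_jeager; infer_instance

def pvWitness_move_like_jeager : List String := ["O.#O", ".O..", "#.OO"]

def Spec_move_like_jeager (lines : List String) (out : Int) : Prop := out = move_like_jeager_alt lines
instance (lines : List String) (out : Int) : Decidable (Spec_move_like_jeager lines out) := by unfold Spec_move_like_jeager; infer_instance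

-- ===== CLAIM (what is proved, stated in full; the proofs are below) =====
def Claim_equal_move_like_jeager : Prop := ∀ (lines : List String), Dom_move_like_jeager lines → Pre_move_like_jeager lines → Spec_move_like_jeager lines (move_like_jeager lines)

-- ===== LEMMAS AND PROOFS =====
-- generic per-row update loop: one foldl over enumerate(row) setting s[c] := f s[c] ch
theorem pvRowFold_length {σ : Type} (f : σ → Char → σ) (d : σ) :
    ∀ (row : List Char) (k : Int) (s : List σ),
    ((PySem.List.enumerate row k).foldl
       (fun s ic => s.set ic.1.toNat (f (s.getD ic.1.toNat d) ic.2)) s).length = s.length := by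
  intro row
  induction row with
  | nil => intro k s; simp [PySem.List.enumerate_nil]
  | cons ch row ih =>
    intro k s
    simp only [PySem.List.enumerate_cons, List.foldl_cons]
    rw [ih]
    simp

theorem pvRowFold_get? {σ : Type} (f : σ → Char → σ) (d : σ) :
    ∀ (row : List Char) (k : Nat) (s : List σ), k + row.length ≤ s.length → ∀ c : Nat,
    ((PySem.List.enumerate row (k : Int)).foldl
       (fun s ic => s.set ic.1.toNat (f (s.getD ic.1.toNat d) ic.2)) s)[c]? =
    if h : k ≤ c ∧ c - k < row.length then some (f (s.getD c d) (row[c - k]'h.2)) else s[c]? := by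
  intro row
  induction row with
  | nil =>
    intro k s hle c
    simp only [PySem.List.enumerate_nil, List.foldl_nil, List.length_nil]
    rw [dif_neg (by omega)]
  | cons ch row ih =>
    intro k s hle c
    simp only [PySem.List.enumerate_cons, List.foldl_cons, Int.toNat_natCast]
    have hcast : (k : Int) + 1 = ((k + 1 : Nat) : Int) := by push_cast; ring
    have hlen : k < s.length := by simp at hle; omega
    rw [hcast, ih (k+1) _ (by simp [List.length_set]; simp at hle ⊢; omega) c]
    by_cases h1 : c = k
    · subst h1
      rw [dif_neg (by omega), dif_pos (by simp only [List.length_cons]; omega)]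
      simp [hlen, List.getD_eq_getElem?_getD]
    · by_cases h2 : k ≤ c ∧ c - k < row.length + 1
      · rw [dif_pos (by omega), dif_pos (by simp only [List.length_cons]; omega)]
        have hne : ¬ k = c := by omega
        have hgd : (s.set k (f (s.getD k d) ch)).getD c d = s.getD c d := by
          simp [List.getD_eq_getElem?_getD, hne]
        rw [hgd]
        have h3 : c - k = (c - (k + 1)) + 1 := by omega
        simp only [h3, List.getElem_cons_succ]
      · rw [dif_neg (by omega), dif_neg (by simp only [List.length_cons]; omega)]
        have hne : ¬ k = c := by omega
        simp [hne]

-- column view: after folding all rows, slot c holds the fold of f over the c-th column's chars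
theorem pvRowsFold_get? {σ : Type} (f : σ → Char → σ) (d : σ) :
    ∀ (rows : List (List Char)) (s : List σ), (∀ r ∈ rows, r.length ≤ s.length) →
    ∀ c : Nat, c < s.length →
    (rows.foldl (fun s row => (PySem.List.enumerate row).foldl
        (fun s ic => s.set ic.1.toNat (f (s.getD ic.1.toNat d) ic.2)) s) s)[c]? =
    some (List.foldl f (s.getD c d) (rows.filterMap (fun r => r[c]?))) := by
  intro rows
  induction rows with
  | nil => intro s _ c hc; simp [List.getD_eq_getElem?_getD, List.getElem?_eq_getElem hc]
  | cons r rows ih =>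
    intro s hle c hc
    simp only [List.foldl_cons, List.filterMap_cons]
    have h0 : PySem.List.enumerate r = PySem.List.enumerate r ((0 : Nat) : Int) := by norm_num
    have hrlen : r.length ≤ s.length := hle r (List.mem_cons_self ..)
    have hslen : (((PySem.List.enumerate r ((0:Nat):Int)).foldl
        (fun s ic => s.set ic.1.toNat (f (s.getD ic.1.toNat d) ic.2)) s)).length = s.length :=
      pvRowFold_length f d r _ s
    rw [h0, ih _ (by rw [hslen]; intro x hx; exact hle x (List.mem_cons_of_mem _ hx)) c (by omega)]
    have hget := pvRowFold_get? f d r 0 s (by omega) c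
    by_cases hcr : c < r.length
    · rw [dif_pos (by omega)] at hget
      have hx : (((PySem.List.enumerate r ((0:Nat):Int)).foldl
          (fun s ic => s.set ic.1.toNat (f (s.getD ic.1.toNat d) ic.2)) s)).getD c d
          = f (s.getD c d) r[c] := by
        rw [List.getD_eq_getElem?_getD, hget]
        simp
      rw [hx, List.getElem?_eq_getElem hcr]
      simp
    · rw [dif_neg (by omega)] at hget
      have hx : (((PySem.List.enumerate r ((0:Nat):Int)).foldl
          (fun s ic => s.set ic.1.toNat (f (s.getD ic.1.toNat d) ic.2)) s)).getD c d
          = s.getD c d := by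
        rw [List.getD_eq_getElem?_getD, hget, List.getD_eq_getElem?_getD]
      rw [hx, List.getElem?_eq_none (by omega)]

-- simulation: A's (line_total, current_max_points) scan of a column equals B's per-column state fold
theorem pvColSim (n : Int) :
    ∀ (col : List Char) (k : Nat) (free load : Int),
    ((PySem.List.enumerate col (k : Int)).foldl
      (fun (st : Int × Int) ic =>
        if ic.2 = '.' then st
        else if ic.2 = 'O' then (st.1 + st.2, st.2 - 1)
        else if ic.2 = '#' then (st.1, (n - ic.1) - 1)
        else (st.1, st.2 - 1)) (load, n - free)).1
    = (List.foldl (pvStepB n) (free, (k : Int), load) col).2.2 := by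
  intro col
  induction col with
  | nil => intro k free load; simp [PySem.List.enumerate_nil]
  | cons ch col ih =>
    intro k free load
    simp only [PySem.List.enumerate_cons, List.foldl_cons, pvStepB]
    have hcast : (k : Int) + 1 = ((k + 1 : Nat) : Int) := by push_cast; ring
    by_cases h1 : ch = '.'
    · simp only [h1, reduceIte]
      rw [hcast]
      exact ih (k+1) free load
    · by_cases h2 : ch = 'O'
      · simp only [h2, reduceIte]
        have hA : n - free - 1 = n - (free + 1) := by ring
        rw [hA, hcast]
        exact ih (k+1) (free+1) (load + (n - free))
      · by_cases h3 : ch = '#'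
        · simp only [h3, reduceIte]
          rw [hcast]
          have hA : n - (k : Int) - 1 = n - ((k+1 : Nat) : Int) := by push_cast; ring
          rw [hA]
          exact ih (k+1) ((k+1 : Nat) : Int) load
        · simp only [if_neg h1, if_neg h2, if_neg h3]
          have hA : n - free - 1 = n - (free + 1) := by ring
          rw [hA, hcast]
          exact ih (k+1) (free+1) load

theorem pvRowsFold_length {σ : Type} (f : σ → Char → σ) (d : σ) :
    ∀ (rows : List (List Char)) (s : List σ),
    (rows.foldl (fun s row => (PySem.List.enumerate row).foldl
        (fun s ic => s.set ic.1.toNat (f (s.getD ic.1.toNat d) ic.2)) s) s).length = s.length := by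
  intro rows
  induction rows with
  | nil => intro s; rfl
  | cons r rows ih => intro s; simp only [List.foldl_cons]; rw [ih, pvRowFold_length]

theorem pvMain (n : Int) (rows : List (List Char)) (W : Nat)
    (hW : ∀ r ∈ rows, r.length ≤ W) :
    (rows.foldl pvTransposeRow (List.replicate W ([] : List Char))).foldl
       (fun total col => total + pvColA n col) 0
    = ((rows.foldl (pvRowB n) (List.replicate W ((0, 0, 0) : Int × Int × Int))).map
       (fun t => t.2.2)).sum := by
  have eA : rows.foldl pvTransposeRow (List.replicate W ([] : List Char))
      = rows.foldl (fun s row => (PySem.List.enumerate row).foldl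
          (fun s ic => s.set ic.1.toNat
            ((fun (l : List Char) (ch : Char) => l ++ [ch]) (s.getD ic.1.toNat []) ic.2)) s)
          (List.replicate W ([] : List Char)) := rfl
  have eB : rows.foldl (pvRowB n) (List.replicate W ((0, 0, 0) : Int × Int × Int))
      = rows.foldl (fun s row => (PySem.List.enumerate row).foldl
          (fun s ic => s.set ic.1.toNat (pvStepB n (s.getD ic.1.toNat (0, 0, 0)) ic.2)) s)
          (List.replicate W ((0, 0, 0) : Int × Int × Int)) := rfl
  rw [eA, eB]
  have hlA := pvRowsFold_length (fun (l : List Char) (ch : Char) => l ++ [ch]) [] rows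
      (List.replicate W ([] : List Char))
  have hlB := pvRowsFold_length (pvStepB n) (0, 0, 0) rows
      (List.replicate W ((0, 0, 0) : Int × Int × Int))
  have hmap : (rows.foldl (fun s row => (PySem.List.enumerate row).foldl
          (fun s ic => s.set ic.1.toNat
            ((fun (l : List Char) (ch : Char) => l ++ [ch]) (s.getD ic.1.toNat []) ic.2)) s)
          (List.replicate W ([] : List Char))).map (pvColA n)
      = (rows.foldl (fun s row => (PySem.List.enumerate row).foldl
          (fun s ic => s.set ic.1.toNat (pvStepB n (s.getD ic.1.toNat (0, 0, 0)) ic.2)) s)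
          (List.replicate W ((0, 0, 0) : Int × Int × Int))).map (fun t => t.2.2) := by
    apply List.ext_getElem?
    intro c
    rw [List.getElem?_map, List.getElem?_map]
    by_cases hc : c < W
    · rw [pvRowsFold_get? (fun (l : List Char) (ch : Char) => l ++ [ch]) [] rows _
          (by intro r hr; rw [List.length_replicate]; exact hW r hr) c (by simpa using hc),
        pvRowsFold_get? (pvStepB n) (0, 0, 0) rows _
          (by intro r hr; rw [List.length_replicate]; exact hW r hr) c (by simpa using hc)]
      simp only [Option.map_some]
      congr 1
      have hcol : List.foldl (fun (l : List Char) (ch : Char) => l ++ [ch])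
          ((List.replicate W ([] : List Char)).getD c []) (rows.filterMap (fun r => r[c]?))
          = rows.filterMap (fun r => r[c]?) := by
        rw [List.getD_eq_getElem?_getD, List.getElem?_replicate, if_pos hc,
          PySem.List.foldl_append_singleton]
        simp
      rw [hcol]
      have hrepl : (List.replicate W ((0,0,0) : Int × Int × Int)).getD c (0,0,0) = (0,0,0) := by
        rw [List.getD_eq_getElem?_getD, List.getElem?_replicate, if_pos hc]
        rfl
      rw [hrepl]
      have := pvColSim n (rows.filterMap (fun r => r[c]?)) 0 0 0
      simpa using this
    · rw [List.getElem?_eq_none (by rw [hlA, List.length_replicate]; omega),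
        List.getElem?_eq_none (by rw [hlB, List.length_replicate]; omega)]
      rfl
  rw [← hmap, PySem.List.foldl_add]
  simp


-- ===== VERDICT (by name: the statement is the Claim_ definition above) =====
theorem move_like_jeager_spec : Claim_equal_move_like_jeager := by
  intro lines _hdom hpre
  obtain ⟨hne, hlen⟩ := hpre
  unfold Spec_move_like_jeager
  dsimp only [move_like_jeager, move_like_jeager_alt, pvTransposeA, pvStripA]
  apply pvMain
  intro r hr
  simp only [List.mem_map] at hr
  obtain ⟨l, hl, rfl⟩ := hr
  have hh : (lines.map pvStripA).headD [] = pvStripA (lines.headD "") := by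
    cases lines with
    | nil => exact absurd rfl hne
    | cons a t => rfl
  rw [hh]
  simpa [pvStripA] using hlen l hl
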